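-- pv_equiv track=rewrite | github.com/Aasthaengg/IBMdataset | Python_codes/p03170/s883186827.py | solve
-- ===== SOURCE A (Python) =====
-- def solve(K, A):
--     dp = [ False ] * (K + 1)
--     # dp[i] - true if current player wins if there are i stones remaining
--     for stones in range(K + 1):
--         for w in A:
--             if stones >= w: # there must be more stones than we are removing
--                 if not dp[stones - w]: # does the opponent win after we remove `w` stones?
--                     dp[stones] = True # then this player does win
--     return "First" if dp[K] else "Second"
-- ===== SOURCE B (Python) =====
-- def solve(K, A):
--     # Sprague-Grundy: g[i] = mex of the Grundy values reachable by one move;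
--     # the first player wins iff the nimber of K is nonzero.
--     g = [0] * (K + 1)
--     for i in range(K + 1):
--         reach = set()
--         for w in A:
--             if i >= w:
--                 reach.add(g[i - w])
--         m = 0
--         while m in reach:
--             m += 1
--         g[i] = m
--     return "First" if g[K] != 0 else "Second"
-- ===== Notes on version B (the rewrite author's own statement) =====
-- stated objective: alternative
-- what changed: Replaces A's boolean win/loss table (position wins iff some move reaches a loss) by a Sprague-Grundy computation: an integer nimber table where each entry is the mex of the nimbers reachable by one move, answering First iff the nimber of K is nonzero.
import Mathlib
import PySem

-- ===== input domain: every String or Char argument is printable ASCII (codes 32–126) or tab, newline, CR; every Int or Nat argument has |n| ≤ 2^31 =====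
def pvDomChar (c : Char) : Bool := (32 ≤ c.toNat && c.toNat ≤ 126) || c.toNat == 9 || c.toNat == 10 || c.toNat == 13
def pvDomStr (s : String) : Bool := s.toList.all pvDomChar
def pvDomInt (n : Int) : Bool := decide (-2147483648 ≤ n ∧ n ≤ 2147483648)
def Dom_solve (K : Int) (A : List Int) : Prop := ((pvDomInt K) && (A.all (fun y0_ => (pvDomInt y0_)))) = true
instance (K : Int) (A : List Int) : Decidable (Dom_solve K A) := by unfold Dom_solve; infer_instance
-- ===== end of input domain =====

-- B replaces A's boolean win/loss table by a Sprague-Grundy computation: an integer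
-- nimber per position, each the mex of the nimbers reachable by one move; the answer
-- is "First" iff the nimber of K is nonzero ('alternative'; not claimed faster).

-- Python list read / write on an Array (negative index counts from the end as in
-- Python; an out-of-range read yields the default and an out-of-range write is the
-- identity — used only under Pre_, which keeps every index in range, exactly like
-- PySem.List.pyGetD / pySetD; Array stands for Python's O(1)-access list).
def aGetD {α : Type} (a : Array α) (i : Int) (d : α) : α :=
  let j : Int := if i < 0 then i + (a.size : Int) else i
  if h : 0 ≤ j ∧ j.toNat < a.size then a[j.toNat] else d

def aSetD {α : Type} (a : Array α) (i : Int) (v : α) : Array α :=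
  let j : Int := if i < 0 then i + (a.size : Int) else i
  if h : 0 ≤ j ∧ j.toNat < a.size then a.set j.toNat v else a

-- ===== PORT A =====
def solve (K : Int) (A : List Int) : String :=
  let dp0 : Array Bool := Array.replicate (K + 1).toNat false
  let dp := (PySem.List.pyRange 0 (K + 1) 1).foldl (fun dp stones =>
      A.foldl (fun dp w =>
        if stones ≥ w then
          if !(aGetD dp (stones - w) false) then aSetD dp stones true else dp
        else dp) dp) dp0
  if aGetD dp K false then "First" else "Second"

-- ===== PORT B =====
-- 'm = 0; while m in reach: m += 1' — reach holds at most reach.length distinct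
-- values, so the loop exits within reach.length + 1 tests; the fuel makes the very
-- same test-and-increment loop structural (exact).
def mexAux (reach : List Int) : Nat → Int → Int
  | 0, m => m
  | fuel + 1, m => if reach.contains m then mexAux reach fuel (m + 1) else m

def solve_alt (K : Int) (A : List Int) : String :=
  let g0 : Array Int := Array.replicate (K + 1).toNat 0
  let g := (PySem.List.pyRange 0 (K + 1) 1).foldl (fun g i =>
      let reach : PySem.Set Int :=
        A.foldl (fun reach w =>
          if i ≥ w then PySem.Set.add reach (aGetD g (i - w) 0) else reach)
          PySem.Set.empty
      aSetD g i (mexAux reach (reach.length + 1) 0)) g0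
  if aGetD g K 0 ≠ 0 then "First" else "Second"

-- ===== PRECONDITION & SPEC =====
-- A raises IndexError exactly when K < 0 (dp[K] on an empty table) or some move is
-- negative (dp[stones - w] runs past the end at stones = K); Pre_ excludes only those.
def Pre_solve (K : Int) (A : List Int) : Prop := 0 ≤ K ∧ ∀ w ∈ A, 0 ≤ w
instance (K : Int) (A : List Int) : Decidable (Pre_solve K A) := by unfold Pre_solve; infer_instance
def pvWitness_solve : Int × List Int := (5, [2, 3])

def Spec_solve (K : Int) (A : List Int) (out : String) : Prop := out = solve_alt K A
instance (K : Int) (A : List Int) (out : String) : Decidable (Spec_solve K A out) := by unfold Spec_solve; infer_instance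

-- ===== CLAIM (what is proved, stated in full; the proofs are below) =====
def Claim_equal_solve : Prop := ∀ (K : Int) (A : List Int), Dom_solve K A → Pre_solve K A → Spec_solve K A (solve K A)

-- ===== LEMMAS AND PROOFS =====

-- The winning predicate: position i is a win iff some move 1 ≤ w ≤ i leads to a loss.
def Wf (A : List Int) (i : Nat) : Bool :=
  A.any (fun w => if _h : 1 ≤ w ∧ w ≤ (i : Int) then !Wf A (i - w.toNat) else false)
termination_by i
decreasing_by omega

-- ---- generic Array ↔ List bridges ----
lemma aGetD_nonneg {α : Type} (a : Array α) (i : Int) (d : α) (h : 0 ≤ i) :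
    aGetD a i d = PySem.List.pyGetD a.toList i d := by
  obtain ⟨n, rfl⟩ := Int.eq_ofNat_of_zero_le h
  rw [PySem.List.pyGetD_natCast]
  unfold aGetD
  simp only [if_neg (show ¬((n : Int) < 0) by omega)]
  by_cases hn : n < a.size
  · rw [dif_pos (by constructor <;> omega)]
    simp [List.getD_eq_getElem?_getD, hn]
  · rw [dif_neg (by omega)]
    rw [List.getD_eq_getElem?_getD, List.getElem?_eq_none (by simpa using hn)]
    rfl

lemma aSetD_toList {α : Type} (a : Array α) (i : Int) (v : α) (h : 0 ≤ i) :
    (aSetD a i v).toList = PySem.List.pySetD a.toList i v := by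
  obtain ⟨n, rfl⟩ := Int.eq_ofNat_of_zero_le h
  rw [PySem.List.pySetD_of_nonneg _ _ (by omega)]
  unfold aSetD
  simp only [if_neg (show ¬((n : Int) < 0) by omega)]
  have hn : ((n : Int)).toNat = n := by omega
  by_cases hlt : n < a.size
  · rw [dif_pos (by constructor <;> omega)]
    simp [hn]
  · rw [dif_neg (by omega), hn, List.set_eq_of_length_le (by simpa using hlt)]

lemma fold_toList {α : Type} (l : List Int) (hl : ∀ s ∈ l, 0 ≤ s)
    (fA : Array α → Int → Array α) (fL : List α → Int → List α)
    (hstep : ∀ (a : Array α) (s : Int), 0 ≤ s → (fA a s).toList = fL a.toList s)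
    (a : Array α) :
    (l.foldl fA a).toList = l.foldl fL a.toList := by
  induction l generalizing a with
  | nil => rfl
  | cons s l ih =>
    simp only [List.foldl_cons]
    rw [ih (fun x hx => hl x (List.mem_cons_of_mem _ hx)),
      hstep a s (hl s (List.mem_cons_self ..))]

-- ---- list-level form of port A ----
def stepA (s : Int) (dp : List Bool) (w : Int) : List Bool :=
  if s ≥ w then
    if !(PySem.List.pyGetD dp (s - w) false) then PySem.List.pySetD dp s true else dp
  else dp

def innerA (L : List Int) (dp : List Bool) (s : Int) : List Bool := L.foldl (stepA s) dp

lemma innerA_bridge (L : List Int) (dp : Array Bool) (s : Int) (hs : 0 ≤ s) :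
    (L.foldl (fun dp w =>
        if s ≥ w then
          if !(aGetD dp (s - w) false) then aSetD dp s true else dp
        else dp) dp).toList = innerA L dp.toList s := by
  induction L generalizing dp with
  | nil => rfl
  | cons w L ih =>
    simp only [List.foldl_cons]
    rw [ih]
    have hstep : (if s ≥ w then
          if !(aGetD dp (s - w) false) then aSetD dp s true else dp
        else dp).toList = stepA s dp.toList w := by
      unfold stepA
      by_cases hw : s ≥ w
      · rw [if_pos hw, if_pos hw, aGetD_nonneg _ _ _ (by omega)]
        by_cases hg : PySem.List.pyGetD dp.toList (s - w) false
        · rw [if_neg (by simp [hg]), if_neg (by simp [hg])]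
        · simp only [Bool.not_eq_true] at hg
          rw [if_pos (by simp [hg]), if_pos (by simp [hg]), aSetD_toList _ _ _ hs]
      · rw [if_neg hw, if_neg hw]
    have hr : innerA (w :: L) dp.toList s = innerA L (stepA s dp.toList w) s := rfl
    rw [hr, hstep]

lemma solve_bridge (K : Int) (A : List Int) (hK : 0 ≤ K) :
    solve K A =
      (if PySem.List.pyGetD
          ((PySem.List.pyRange 0 (K + 1) 1).foldl (fun dp s => innerA A dp s)
            (List.replicate (K + 1).toNat false)) K false
        then "First" else "Second") := by
  show (if aGetD ((PySem.List.pyRange 0 (K + 1) 1).foldl (fun dp stones =>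
      A.foldl (fun dp w =>
        if stones ≥ w then
          if !(aGetD dp (stones - w) false) then aSetD dp stones true else dp
        else dp) dp) (Array.replicate (K + 1).toNat false)) K false
    then "First" else "Second") = _
  rw [aGetD_nonneg _ _ _ hK,
    fold_toList _ (fun s hs => by
        have := PySem.List.mem_pyRange_one.mp hs; omega)
      _ _ (fun a s hs => innerA_bridge A a s hs)]
  simp

-- ---- A's list-level loop builds the Wf table (all moves ≥ 1) ----
def Pbw (A : List Int) (n : Nat) : Bool :=
  A.any (fun w => decide (w ≤ (n : Int)) && !Wf A (n - w.toNat))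

lemma getD_set_ne' (l : List Bool) (k n : Nat) (h : k ≠ n) (d : Bool) :
    (l.set k d).getD n false = l.getD n false := by
  simp [List.getD_eq_getElem?_getD, List.getElem?_set_ne h]

lemma innerA_eq (A L : List Int) (hL : ∀ w ∈ L, 1 ≤ w) (dp : List Bool) (n : Nat)
    (hn : n < dp.length) (hval : ∀ j : Nat, j < n → dp.getD j false = Wf A j) :
    innerA L dp (n : Int) =
      (if L.any (fun w => decide (w ≤ (n : Int)) && !Wf A (n - w.toNat)) then dp.set n true else dp) := by
  induction L generalizing dp with
  | nil => simp [innerA]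
  | cons w L ih =>
    show innerA L (stepA (n : Int) dp w) (n : Int) = _
    have hw1 : 1 ≤ w := hL w (List.mem_cons_self ..)
    have hLr : ∀ w ∈ L, 1 ≤ w := fun w hw => hL w (List.mem_cons_of_mem _ hw)
    by_cases hwn : w ≤ (n : Int)
    · have hidx : ((n : Int) - w) = ((n - w.toNat : Nat) : Int) := by omega
      have hjlt : n - w.toNat < n := by omega
      have hstep : stepA (n : Int) dp w =
          (if Wf A (n - w.toNat) then dp else dp.set n true) := by
        unfold stepA
        rw [if_pos (by omega)]
        rw [hidx, PySem.List.pyGetD_natCast, hval _ hjlt, PySem.List.pySetD_natCast]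
        cases Wf A (n - w.toNat) <;> simp
      by_cases hWf : Wf A (n - w.toNat) = true
      · rw [hstep, if_pos hWf]
        rw [ih hLr dp hn hval]
        have : ((w :: L).any (fun w => decide (w ≤ (n : Int)) && !Wf A (n - w.toNat)))
             = (L.any (fun w => decide (w ≤ (n : Int)) && !Wf A (n - w.toNat))) := by
          simp [hWf]
        rw [this]
      · simp only [Bool.not_eq_true] at hWf
        rw [hstep, if_neg (by simp [hWf])]
        have hval' : ∀ j : Nat, j < n → (dp.set n true).getD j false = Wf A j := by
          intro j hj; rw [getD_set_ne' _ _ _ (by omega)]; exact hval j hj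
        rw [ih hLr (dp.set n true) (by simp [hn]) hval']
        have hany : ((w :: L).any (fun w => decide (w ≤ (n : Int)) && !Wf A (n - w.toNat))) = true := by
          simp [List.any_cons, hwn, hWf]
        rw [hany, if_pos rfl]
        split_ifs <;> simp [List.set_set]
    · have hstep : stepA (n : Int) dp w = dp := by unfold stepA; rw [if_neg (by omega)]
      rw [hstep, ih hLr dp hn hval]
      have : ((w :: L).any (fun w => decide (w ≤ (n : Int)) && !Wf A (n - w.toNat)))
           = (L.any (fun w => decide (w ≤ (n : Int)) && !Wf A (n - w.toNat))) := by
        simp [List.any_cons, hwn]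
      rw [this]

lemma any_eq_Wf (A : List Int) (hA : ∀ w ∈ A, 1 ≤ w) (n : Nat) :
    A.any (fun w => decide (w ≤ (n : Int)) && !Wf A (n - w.toNat)) = Wf A n := by
  conv_rhs => rw [Wf]
  apply Bool.eq_iff_iff.mpr
  simp only [List.any_eq_true, Bool.and_eq_true, decide_eq_true_eq]
  constructor
  · rintro ⟨w, hw, hwn, hWf⟩
    refine ⟨w, hw, ?_⟩
    rw [dif_pos ⟨hA w hw, hwn⟩]; exact hWf
  · rintro ⟨w, hw, hWf⟩
    by_cases hc : 1 ≤ w ∧ w ≤ (n : Int)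
    · rw [dif_pos hc] at hWf; exact ⟨w, hw, hc.2, hWf⟩
    · rw [dif_neg hc] at hWf; exact absurd hWf (by simp)

lemma outerA (A : List Int) (hA : ∀ w ∈ A, 1 ≤ w) (N : Nat) :
    ∀ m : Nat, m ≤ N →
    (PySem.List.pyRange 0 (m : Int) 1).foldl (fun dp s => innerA A dp s) (List.replicate N false)
      = (List.range N).map (fun j => if j < m then Wf A j else false) := by
  intro m hm
  induction m with
  | zero =>
    rw [PySem.List.pyRange_one_eq_nil (by omega)]
    simp
  | succ m ih =>
    have hcast : ((m + 1 : Nat) : Int) = (m : Int) + 1 := by push_cast; ring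
    rw [hcast, PySem.List.pyRange_one_succ_right (by omega), List.foldl_append,
        ih (by omega)]
    simp only [List.foldl_cons, List.foldl_nil]
    have hlen : ((List.range N).map (fun j => if j < m then Wf A j else false)).length = N := by
      simp
    rw [innerA_eq A A hA _ m (by omega)
        (fun j hj => by rw [PySem.List.getD_map_range _ _ _ _ (by omega)]; simp [hj]),
      any_eq_Wf A hA m]
    by_cases hWf : Wf A m = true
    · rw [if_pos hWf]
      apply List.ext_getElem (by simp)
      intro j h1 h2
      simp only [List.getElem_set, List.getElem_map, List.getElem_range]
      by_cases hje : m = j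
      · subst hje; rw [if_pos rfl, if_pos (by omega), hWf]
      · rw [if_neg hje]
        by_cases hlt : j < m
        · rw [if_pos hlt, if_pos (by omega)]
        · rw [if_neg hlt, if_neg (by omega)]
    · simp only [Bool.not_eq_true] at hWf
      rw [if_neg (by simp [hWf])]
      apply List.map_congr_left
      intro j hj
      by_cases hjm : j = m
      · subst hjm; simp [hWf]
      · have : (j < m) ↔ (j < m + 1) := by
          rw [List.mem_range] at hj; omega
        simp [this]

lemma solve_char (A : List Int) (hA : ∀ w ∈ A, 1 ≤ w) (n : Nat) :
    solve (n : Int) A = (if Wf A n then "First" else "Second") := by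
  rw [solve_bridge _ _ (by omega)]
  have h1 : ((n : Int) + 1) = ((n + 1 : Nat) : Int) := by push_cast; ring
  have h2 : ((n : Int) + 1).toNat = n + 1 := by omega
  rw [h2, h1, outerA A hA (n + 1) (n + 1) le_rfl, PySem.List.pyGetD_natCast,
    PySem.List.getD_map_range _ _ _ _ (by omega)]
  simp

-- ---- A on a zero move: every position is marked winning ----
lemma getD_set_self_true (l : List Bool) (n : Nat) (hn : n < l.length) :
    (l.set n true).getD n false = true := by
  simp [List.getD_eq_getElem?_getD, List.getElem?_set_self hn]

lemma step_self_true (dp : List Bool) (n : Nat) (hn : n < dp.length) :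
    (if (!dp.getD n false) = true then dp.set n true else dp).getD n false = true := by
  by_cases hd : dp.getD n false = true
  · rw [if_neg (by rw [hd]; simp)]; exact hd
  · have hd' : dp.getD n false = false := by simpa using hd
    rw [if_pos (by rw [hd']; simp)]; exact getD_set_self_true _ _ hn

lemma stepA_length (s : Int) (dp : List Bool) (w : Int) : (stepA s dp w).length = dp.length := by
  unfold stepA; split_ifs <;> simp [PySem.List.length_pySetD]

lemma innerA_length (L : List Int) (dp : List Bool) (s : Int) :
    (innerA L dp s).length = dp.length := by
  induction L generalizing dp with
  | nil => rfl
  | cons w L ih => show (innerA L (stepA s dp w) s).length = _; rw [ih, stepA_length]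

lemma innerA_mono (L : List Int) (dp : List Bool) (n : Nat) (hn : n < dp.length)
    (h : dp.getD n false = true) : (innerA L dp (n : Int)).getD n false = true := by
  induction L generalizing dp with
  | nil => exact h
  | cons w L ih =>
    show (innerA L (stepA (n : Int) dp w) (n : Int)).getD n false = true
    have hlen : (stepA (n : Int) dp w).length = dp.length := stepA_length _ _ _
    apply ih _ (by omega)
    unfold stepA
    split_ifs with h1 h2
    · rw [PySem.List.pySetD_natCast]; exact getD_set_self_true _ _ hn
    · exact h
    · exact h

lemma innerA_hits (L : List Int) (dp : List Bool) (n : Nat) (hn : n < dp.length)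
    (h0 : (0 : Int) ∈ L) : (innerA L dp (n : Int)).getD n false = true := by
  induction L generalizing dp with
  | nil => simp at h0
  | cons w L ih =>
    show (innerA L (stepA (n : Int) dp w) (n : Int)).getD n false = true
    have hlen : (stepA (n : Int) dp w).length = dp.length := stepA_length _ _ _
    rcases List.mem_cons.mp h0 with h0w | h0L
    · subst h0w
      apply innerA_mono _ _ _ (by omega)
      unfold stepA
      rw [if_pos (by omega : ((n : Int) ≥ 0))]
      have hidx : ((n : Int) - 0) = (n : Int) := by ring
      rw [hidx, PySem.List.pyGetD_natCast, PySem.List.pySetD_natCast]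
      exact step_self_true dp n hn
    · exact ih _ (by omega) h0L

lemma foldl_innerA_length (A : List Int) (l : List Int) (dp : List Bool) :
    (l.foldl (fun dp s => innerA A dp s) dp).length = dp.length := by
  induction l generalizing dp with
  | nil => rfl
  | cons s l ih => simp only [List.foldl_cons]; rw [ih, innerA_length]

lemma solve_first (A : List Int) (h0 : (0 : Int) ∈ A) (n : Nat) :
    solve (n : Int) A = "First" := by
  rw [solve_bridge _ _ (by omega)]
  have h2 : ((n : Int) + 1).toNat = n + 1 := by omega
  rw [h2, PySem.List.pyRange_one_succ_right (by omega), List.foldl_append]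
  simp only [List.foldl_cons, List.foldl_nil]
  set dpPrev := (PySem.List.pyRange 0 (n : Int) 1).foldl (fun dp s => innerA A dp s)
    (List.replicate (n + 1) false) with hdp
  have hlen : dpPrev.length = n + 1 := by
    rw [hdp, foldl_innerA_length]; simp
  have hT : PySem.List.pyGetD (innerA A dpPrev (n : Int)) (n : Int) false = true := by
    rw [PySem.List.pyGetD_natCast]
    exact innerA_hits A dpPrev n (by omega) h0
  rw [if_pos hT]

-- ---- list-level form of port B ----
def reachL (A : List Int) (g : List Int) (i : Int) : PySem.Set Int :=
  A.foldl (fun r w => if i ≥ w then PySem.Set.add r (PySem.List.pyGetD g (i - w) 0) else r)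
    PySem.Set.empty

def stepG (A : List Int) (g : List Int) (i : Int) : List Int :=
  PySem.List.pySetD g i (mexAux (reachL A g i) ((reachL A g i).length + 1) 0)

lemma stepG_bridge (A : List Int) (g : Array Int) (i : Int) (hi : 0 ≤ i) :
    (aSetD g i (mexAux
        (A.foldl (fun reach w =>
          if i ≥ w then PySem.Set.add reach (aGetD g (i - w) 0) else reach)
          PySem.Set.empty)
        ((A.foldl (fun reach w =>
          if i ≥ w then PySem.Set.add reach (aGetD g (i - w) 0) else reach)
          PySem.Set.empty).length + 1) 0)).toList = stepG A g.toList i := by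
  have hreach : (A.foldl (fun reach w =>
      if i ≥ w then PySem.Set.add reach (aGetD g (i - w) 0) else reach)
      PySem.Set.empty) = reachL A g.toList i := by
    unfold reachL
    have hfun : (fun (r : PySem.Set Int) (w : Int) =>
          if i ≥ w then PySem.Set.add r (aGetD g (i - w) 0) else r)
        = (fun (r : PySem.Set Int) (w : Int) =>
          if i ≥ w then PySem.Set.add r (PySem.List.pyGetD g.toList (i - w) 0) else r) := by
      funext r w
      by_cases hw : i ≥ w
      · rw [if_pos hw, if_pos hw, aGetD_nonneg _ _ _ (by omega)]
      · rw [if_neg hw, if_neg hw]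
    rw [hfun]
  rw [hreach, aSetD_toList _ _ _ hi]
  rfl

lemma solve_alt_bridge (K : Int) (A : List Int) (hK : 0 ≤ K) :
    solve_alt K A =
      (if PySem.List.pyGetD
          ((PySem.List.pyRange 0 (K + 1) 1).foldl (stepG A)
            (List.replicate (K + 1).toNat 0)) K 0 ≠ 0
        then "First" else "Second") := by
  show (if aGetD ((PySem.List.pyRange 0 (K + 1) 1).foldl (fun g i =>
      let reach : PySem.Set Int :=
        A.foldl (fun reach w =>
          if i ≥ w then PySem.Set.add reach (aGetD g (i - w) 0) else reach)
          PySem.Set.empty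
      aSetD g i (mexAux reach (reach.length + 1) 0)) (Array.replicate (K + 1).toNat 0)) K 0 ≠ 0
    then "First" else "Second") = _
  rw [aGetD_nonneg _ _ _ hK,
    fold_toList _ (fun s hs => by
        have := PySem.List.mem_pyRange_one.mp hs; omega)
      _ (stepG A) (fun a s hs => stepG_bridge A a s hs)]
  simp

-- ---- facts about mexAux and reach ----
lemma mexAux_ge (reach : List Int) : ∀ (fuel : Nat) (m : Int), m ≤ mexAux reach fuel m := by
  intro fuel
  induction fuel with
  | zero => intro m; exact le_rfl
  | succ fuel ih =>
    intro m
    unfold mexAux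
    split_ifs
    · have := ih (m + 1); omega
    · exact le_rfl

lemma mem_reachL (A : List Int) (g : List Int) (i : Int) (x : Int) :
    x ∈ reachL A g i ↔ ∃ w ∈ A, i ≥ w ∧ x = PySem.List.pyGetD g (i - w) 0 := by
  unfold reachL
  have : ∀ (r : PySem.Set Int),
      (x ∈ A.foldl (fun r w => if i ≥ w then PySem.Set.add r (PySem.List.pyGetD g (i - w) 0) else r) r
        ↔ x ∈ r ∨ ∃ w ∈ A, i ≥ w ∧ x = PySem.List.pyGetD g (i - w) 0) := by
    induction A with
    | nil => intro r; simp
    | cons w L ih =>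
      intro r
      simp only [List.foldl_cons]
      rw [ih]
      by_cases hw : i ≥ w
      · rw [if_pos hw]
        constructor
        · rintro (h | h)
          · rcases (PySem.Set.mem_add _ _ _).mp h with h | h
            · exact Or.inl h
            · exact Or.inr ⟨w, List.mem_cons_self .., hw, h⟩
          · obtain ⟨w', hw', hiw', hx⟩ := h
            exact Or.inr ⟨w', List.mem_cons_of_mem _ hw', hiw', hx⟩
        · rintro (h | ⟨w', hw', hiw', hx⟩)
          · exact Or.inl ((PySem.Set.mem_add _ _ _).mpr (Or.inl h))
          · rcases List.mem_cons.mp hw' with rfl | hw'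
            · exact Or.inl ((PySem.Set.mem_add _ _ _).mpr (Or.inr hx))
            · exact Or.inr ⟨w', hw', hiw', hx⟩
      · rw [if_neg hw]
        constructor
        · rintro (h | ⟨w', hw', hiw', hx⟩)
          · exact Or.inl h
          · exact Or.inr ⟨w', List.mem_cons_of_mem _ hw', hiw', hx⟩
        · rintro (h | ⟨w', hw', hiw', hx⟩)
          · exact Or.inl h
          · rcases List.mem_cons.mp hw' with rfl | hw'
            · exact absurd hiw' hw
            · exact Or.inr ⟨w', hw', hiw', hx⟩
  rw [this]
  simp

lemma mex_zero_iff (reach : List Int) :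
    (mexAux reach (reach.length + 1) 0 = 0) ↔ (0 : Int) ∉ reach := by
  constructor
  · intro h h0
    unfold mexAux at h
    rw [if_pos (by simpa [List.contains_iff_mem] using h0)] at h
    have h1 := mexAux_ge reach reach.length (0 + 1)
    omega
  · intro h0
    unfold mexAux
    rw [if_neg (by simpa [List.contains_iff_mem] using h0)]

-- ---- B's loop: nonzero-ness of the nimber table is the winning predicate ----
def InvG (A : List Int) (N m : Nat) (g : List Int) : Prop :=
  g.length = N ∧ (∀ j : Nat, j < m → ((g.getD j 0 ≠ 0) ↔ Wf A j = true)) ∧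
    (∀ j : Nat, m ≤ j → j < N → g.getD j 0 = 0)

lemma getD_set_ne_int (l : List Int) (k n : Nat) (h : k ≠ n) (v : Int) :
    (l.set k v).getD n 0 = l.getD n 0 := by
  simp [List.getD_eq_getElem?_getD, List.getElem?_set_ne h]

lemma getD_set_self_int (l : List Int) (n : Nat) (hn : n < l.length) (v : Int) :
    (l.set n v).getD n 0 = v := by
  simp [List.getD_eq_getElem?_getD, List.getElem?_set_self hn]

lemma stepG_inv (A : List Int) (hA : ∀ w ∈ A, 1 ≤ w) (N m : Nat) (hm : m < N)
    (g : List Int) (hg : InvG A N m g) : InvG A N (m + 1) (stepG A g (m : Int)) := by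
  obtain ⟨hlen, hlo, hhi⟩ := hg
  have h0reach : ((0 : Int) ∈ reachL A g (m : Int)) ↔ Wf A m = true := by
    rw [mem_reachL, ← any_eq_Wf A hA m]
    simp only [List.any_eq_true, Bool.and_eq_true, decide_eq_true_eq]
    constructor
    · rintro ⟨w, hw, hiw, hx⟩
      refine ⟨w, hw, hiw, ?_⟩
      have hw1 : 1 ≤ w := hA w hw
      have hidx : ((m : Int) - w) = ((m - w.toNat : Nat) : Int) := by omega
      rw [hidx, PySem.List.pyGetD_natCast] at hx
      have hjlt : m - w.toNat < m := by omega
      have hj := hlo _ hjlt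
      rcases Bool.eq_false_or_eq_true (Wf A (m - w.toNat)) with ht | hf
      · exact absurd hx.symm (hj.mpr ht)
      · simp [hf]
    · rintro ⟨w, hw, hiw, hWf⟩
      refine ⟨w, hw, hiw, ?_⟩
      have hw1 : 1 ≤ w := hA w hw
      have hidx : ((m : Int) - w) = ((m - w.toNat : Nat) : Int) := by omega
      rw [hidx, PySem.List.pyGetD_natCast]
      have hjlt : m - w.toNat < m := by omega
      have hj := hlo _ hjlt
      simp only [Bool.not_eq_true'] at hWf
      by_contra hne
      exact absurd (hj.mp (fun he => hne he.symm)) (by simp [hWf])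
  have hmex : (mexAux (reachL A g (m : Int)) ((reachL A g (m : Int)).length + 1) 0 ≠ 0)
      ↔ Wf A m = true := by
    rw [ne_eq, mex_zero_iff]
    rw [← h0reach]
    tauto
  have hstep : stepG A g (m : Int)
      = g.set m (mexAux (reachL A g (m : Int)) ((reachL A g (m : Int)).length + 1) 0) := by
    unfold stepG
    rw [PySem.List.pySetD_natCast]
  rw [hstep]
  refine ⟨by simp [hlen], ?_, ?_⟩
  · intro j hj
    by_cases hje : j = m
    · subst hje
      rw [getD_set_self_int _ _ (by omega)]
      exact hmex
    · rw [getD_set_ne_int _ _ _ (by omega)]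
      exact hlo j (by omega)
  · intro j hj hjN
    rw [getD_set_ne_int _ _ _ (by omega)]
    exact hhi j (by omega) hjN

lemma outerG (A : List Int) (hA : ∀ w ∈ A, 1 ≤ w) (N : Nat) :
    ∀ m : Nat, m ≤ N →
    InvG A N m ((PySem.List.pyRange 0 (m : Int) 1).foldl (stepG A) (List.replicate N 0)) := by
  intro m hm
  induction m with
  | zero =>
    rw [PySem.List.pyRange_one_eq_nil (by omega)]
    exact ⟨by simp, by omega, fun j _ hj => by simp⟩
  | succ m ih =>
    have hcast : ((m + 1 : Nat) : Int) = (m : Int) + 1 := by push_cast; ring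
    rw [hcast, PySem.List.pyRange_one_succ_right (by omega), List.foldl_append]
    simp only [List.foldl_cons, List.foldl_nil]
    exact stepG_inv A hA N m (by omega) _ (ih (by omega))

lemma solve_alt_char (A : List Int) (hA : ∀ w ∈ A, 1 ≤ w) (n : Nat) :
    solve_alt (n : Int) A = (if Wf A n then "First" else "Second") := by
  rw [solve_alt_bridge _ _ (by omega)]
  have h1 : ((n : Int) + 1) = ((n + 1 : Nat) : Int) := by push_cast; ring
  have h2 : ((n : Int) + 1).toNat = n + 1 := by omega
  rw [h2, h1]
  obtain ⟨hlen, hlo, _⟩ := outerG A hA (n + 1) (n + 1) le_rfl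
  rw [PySem.List.pyGetD_natCast]
  have := hlo n (by omega)
  by_cases hWf : Wf A n = true
  · rw [if_pos hWf, if_pos (by tauto)]
  · rw [if_neg (by tauto), if_neg hWf]

-- ---- B on a zero move: every nimber is nonzero ----
def InvZ (N m : Nat) (g : List Int) : Prop :=
  g.length = N ∧ (∀ j : Nat, j < m → g.getD j 0 ≠ 0) ∧
    (∀ j : Nat, m ≤ j → j < N → g.getD j 0 = 0)

lemma stepG_invZ (A : List Int) (h0 : (0 : Int) ∈ A) (N m : Nat) (hm : m < N)
    (g : List Int) (hg : InvZ N m g) : InvZ N (m + 1) (stepG A g (m : Int)) := by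
  obtain ⟨hlen, hlo, hhi⟩ := hg
  have h0reach : (0 : Int) ∈ reachL A g (m : Int) := by
    rw [mem_reachL]
    refine ⟨0, h0, by omega, ?_⟩
    have : ((m : Int) - 0) = (m : Int) := by ring
    rw [this, PySem.List.pyGetD_natCast, hhi m le_rfl hm]
  have hmex : mexAux (reachL A g (m : Int)) ((reachL A g (m : Int)).length + 1) 0 ≠ 0 := by
    intro h
    exact absurd h0reach ((mex_zero_iff _).mp h)
  have hstep : stepG A g (m : Int)
      = g.set m (mexAux (reachL A g (m : Int)) ((reachL A g (m : Int)).length + 1) 0) := by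
    unfold stepG
    rw [PySem.List.pySetD_natCast]
  rw [hstep]
  refine ⟨by simp [hlen], ?_, ?_⟩
  · intro j hj
    by_cases hje : j = m
    · subst hje
      rw [getD_set_self_int _ _ (by omega)]
      exact hmex
    · rw [getD_set_ne_int _ _ _ (by omega)]
      exact hlo j (by omega)
  · intro j hj hjN
    rw [getD_set_ne_int _ _ _ (by omega)]
    exact hhi j (by omega) hjN

lemma outerZ (A : List Int) (h0 : (0 : Int) ∈ A) (N : Nat) :
    ∀ m : Nat, m ≤ N →
    InvZ N m ((PySem.List.pyRange 0 (m : Int) 1).foldl (stepG A) (List.replicate N 0)) := by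
  intro m hm
  induction m with
  | zero =>
    rw [PySem.List.pyRange_one_eq_nil (by omega)]
    exact ⟨by simp, by omega, fun j _ hj => by simp⟩
  | succ m ih =>
    have hcast : ((m + 1 : Nat) : Int) = (m : Int) + 1 := by push_cast; ring
    rw [hcast, PySem.List.pyRange_one_succ_right (by omega), List.foldl_append]
    simp only [List.foldl_cons, List.foldl_nil]
    exact stepG_invZ A h0 N m (by omega) _ (ih (by omega))

lemma solve_alt_first (A : List Int) (h0 : (0 : Int) ∈ A) (n : Nat) :
    solve_alt (n : Int) A = "First" := by
  rw [solve_alt_bridge _ _ (by omega)]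
  have h1 : ((n : Int) + 1) = ((n + 1 : Nat) : Int) := by push_cast; ring
  have h2 : ((n : Int) + 1).toNat = n + 1 := by omega
  rw [h2, h1]
  obtain ⟨hlen, hlo, _⟩ := outerZ A h0 (n + 1) (n + 1) le_rfl
  rw [PySem.List.pyGetD_natCast]
  rw [if_pos (hlo n (by omega))]

-- ===== VERDICT (by name: the statement is the Claim_ definition above) =====
theorem solve_spec : Claim_equal_solve := by
  intro K A _hDom hPre
  obtain ⟨hK, hw⟩ := hPre
  obtain ⟨n, rfl⟩ := Int.eq_ofNat_of_zero_le hK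
  show solve (n : Int) A = solve_alt (n : Int) A
  by_cases h0 : (0 : Int) ∈ A
  · rw [solve_first A h0 n, solve_alt_first A h0 n]
  · have hA1 : ∀ w ∈ A, 1 ≤ w := by
      intro w hmem
      have h1 := hw w hmem
      have h2 : w ≠ 0 := fun e => h0 (e ▸ hmem)
      omega
    rw [solve_char A hA1 n, solve_alt_char A hA1 n]
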